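-- pv_equiv track=rewrite | github.com/shivampatel22/UCSanDiego-data-structures-and-algorithms-specialization | C1-algorithmic-toolbox/course1-problems/advertisement_profit.py | max_ad_profit
-- ===== SOURCE A (Python) =====
-- def max_ad_profit(a, b, n):
--     """Given two sequences a1,a2,...,an (ai is the profit per click of the i-th ad) and
--     b1,b2,...,bn (bi is the average number of clicks per day of the i-th slot), we need
--     to partition them into n pairs (ai,bj) such that the sum of their products is maximized."""
--
--     profit = 0
--     while (len(a)):
--         max_ad = max(a)
--         max_slot = max(b)
--         profit += max_slot * max_ad
--         a.remove(max_ad)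
--         b.remove(max_slot)
--
--     return profit
-- ===== SOURCE B (Python) =====
-- def max_ad_profit(a, b, n):
--     return sum(x * y for x, y in zip(sorted(a, reverse=True), sorted(b, reverse=True)))
-- ===== Notes on version B (the rewrite author's own statement) =====
-- stated objective: faster
-- what changed: Replaces the repeated max+remove loop (quadratic) with sorting both lists descending once and summing pairwise products.
import Mathlib
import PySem

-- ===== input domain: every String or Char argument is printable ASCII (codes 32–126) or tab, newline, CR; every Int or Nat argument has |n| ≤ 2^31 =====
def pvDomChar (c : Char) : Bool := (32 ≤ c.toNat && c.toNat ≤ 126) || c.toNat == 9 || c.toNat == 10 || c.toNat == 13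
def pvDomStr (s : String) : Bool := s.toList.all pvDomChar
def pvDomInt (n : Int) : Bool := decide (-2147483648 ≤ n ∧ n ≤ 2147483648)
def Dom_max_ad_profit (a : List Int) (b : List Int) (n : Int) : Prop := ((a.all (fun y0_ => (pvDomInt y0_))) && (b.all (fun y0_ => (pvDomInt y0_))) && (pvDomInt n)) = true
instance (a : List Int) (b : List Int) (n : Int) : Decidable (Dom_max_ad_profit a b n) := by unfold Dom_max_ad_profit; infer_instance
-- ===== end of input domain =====

-- B replaces A's repeated max+remove loop by sorting both lists descending once and
-- summing pairwise products (objective: faster, asymptotic). A mutates its list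
-- arguments in place (B does not); the equivalence proved here is about the return value.

-- ===== PORT A =====
-- while len(a): profit += max(b) * max(a); a.remove(max(a)); b.remove(max(b))
def maxAdGoA (a b : List Int) (profit : Int) : Int :=
  if ha : a = [] then profit
  else
    let ma := (PySem.List.max? a (fun y => y)).getD 0   -- max(a): a ≠ [] here, so max? is some
    let mb := (PySem.List.max? b (fun y => y)).getD 0   -- max(b): Python raises ValueError when b = [] (outside Pre_)
    maxAdGoA ((PySem.List.remove? a ma).getD []) ((PySem.List.remove? b mb).getD []) (profit + mb * ma)
termination_by a.length
decreasing_by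
  obtain ⟨m, hm⟩ := Option.ne_none_iff_exists'.mp
    (fun h => ha ((PySem.List.max?_eq_none_iff a (fun y => y)).1 h))
  have hmem : m ∈ a := PySem.List.max?_mem hm
  simp only [hm, Option.getD_some, PySem.List.remove?_eq_some_erase a m hmem]
  have := List.length_erase_of_mem hmem
  have : a.length ≠ 0 := by intro h; exact ha (List.length_eq_zero_iff.mp h)
  omega

def max_ad_profit (a : List Int) (b : List Int) (n : Int) : Int :=
  maxAdGoA a b 0

-- ===== PORT B =====
def max_ad_profit_alt (a : List Int) (b : List Int) (n : Int) : Int :=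
  (((PySem.List.sorted a (fun y => y) true).zip
     (PySem.List.sorted b (fun y => y) true)).map (fun p => p.1 * p.2)).sum

-- ===== PRECONDITION & SPEC =====
-- Excludes exactly the inputs where A raises: with fewer slots than ads, b runs out and
-- max(b) on the empty list raises ValueError.
def Pre_max_ad_profit (a : List Int) (b : List Int) (n : Int) : Prop := a.length ≤ b.length
instance (a : List Int) (b : List Int) (n : Int) : Decidable (Pre_max_ad_profit a b n) := by unfold Pre_max_ad_profit; infer_instance
def pvWitness_max_ad_profit : List Int × List Int × Int := ([3, 1, 2], [5, 4, 6], 3)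

def Spec_max_ad_profit (a : List Int) (b : List Int) (n : Int) (out : Int) : Prop := out = max_ad_profit_alt a b n
instance (a : List Int) (b : List Int) (n : Int) (out : Int) : Decidable (Spec_max_ad_profit a b n out) := by unfold Spec_max_ad_profit; infer_instance

-- ===== CLAIM (what is proved, stated in full; the proofs are below) =====
def Claim_equal_max_ad_profit : Prop := ∀ (a : List Int) (b : List Int) (n : Int), Dom_max_ad_profit a b n → Pre_max_ad_profit a b n → Spec_max_ad_profit a b n (max_ad_profit a b n)

-- ===== LEMMAS AND PROOFS =====

-- Popping the maximum of a nonempty list is taking the head of its descending sort.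
theorem sorted_rev_cons_erase_max (a : List Int) (ma : Int)
    (h : PySem.List.max? a (fun y => y) = some ma) :
    PySem.List.sorted a (fun y => y) true =
      ma :: PySem.List.sorted (a.erase ma) (fun y => y) true := by
  have hmem : ma ∈ a := PySem.List.max?_mem h
  have hmax : ∀ y ∈ a, y ≤ ma := fun y hy => PySem.List.max?_isMax h y hy
  have hperm : (ma :: PySem.List.sorted (a.erase ma) (fun y => y) true).Perm a := by
    exact ((PySem.List.sorted_perm _ _ _).cons ma).trans (List.perm_cons_erase hmem).symm
  have hs1 : List.Pairwise (fun x y : Int => y ≤ x) (PySem.List.sorted a (fun y => y) true) :=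
    PySem.List.sorted_pairwise_rev a (fun y => y)
  have hs2 : List.Pairwise (fun x y : Int => y ≤ x)
      (ma :: PySem.List.sorted (a.erase ma) (fun y => y) true) := by
    refine List.Pairwise.cons ?_ (PySem.List.sorted_pairwise_rev _ _)
    intro y hy
    exact hmax y (List.mem_of_mem_erase ((PySem.List.mem_sorted _ _ _ _).1 hy))
  exact List.Perm.eq_of_pairwise (fun x y _ _ h1 h2 => le_antisymm h2 h1) hs1 hs2
    ((PySem.List.sorted_perm a (fun y => y) true).trans hperm.symm)

theorem maxAdGoA_eq (k : Nat) : ∀ (a b : List Int) (p : Int), a.length = k →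
    a.length ≤ b.length →
    maxAdGoA a b p = p + (((PySem.List.sorted a (fun y => y) true).zip
      (PySem.List.sorted b (fun y => y) true)).map (fun q => q.1 * q.2)).sum := by
  induction k with
  | zero =>
    intro a b p hk _
    have ha : a = [] := List.length_eq_zero_iff.mp hk
    subst ha
    rw [maxAdGoA.eq_1]
    simp [PySem.List.sorted]
  | succ k ih =>
    intro a b p hk hle
    have ha : a ≠ [] := by intro h; subst h; simp at hk
    have hb : b ≠ [] := by
      intro h; subst h; simp only [List.length_nil] at hle; omega
    obtain ⟨ma, hma⟩ := Option.ne_none_iff_exists'.mp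
      (fun h => ha ((PySem.List.max?_eq_none_iff a (fun y => y)).1 h))
    obtain ⟨mb, hmb⟩ := Option.ne_none_iff_exists'.mp
      (fun h => hb ((PySem.List.max?_eq_none_iff b (fun y => y)).1 h))
    have hmema : ma ∈ a := PySem.List.max?_mem hma
    have hmemb : mb ∈ b := PySem.List.max?_mem hmb
    rw [maxAdGoA.eq_1]
    simp only [dif_neg ha, hma, hmb,
      PySem.List.remove?_eq_some_erase a ma hmema, PySem.List.remove?_eq_some_erase b mb hmemb,
      Option.getD_some]
    have hlena : (a.erase ma).length = k := by
      rw [List.length_erase_of_mem hmema]; omega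
    have hlenb : (a.erase ma).length ≤ (b.erase mb).length := by
      rw [List.length_erase_of_mem hmema, List.length_erase_of_mem hmemb]; omega
    rw [ih _ _ _ hlena hlenb,
      sorted_rev_cons_erase_max a ma hma, sorted_rev_cons_erase_max b mb hmb]
    simp [List.zip_cons_cons]
    ring

-- ===== VERDICT (by name: the statement is the Claim_ definition above) =====
theorem max_ad_profit_spec : Claim_equal_max_ad_profit := by
  intro a b n _ hpre
  unfold Spec_max_ad_profit max_ad_profit max_ad_profit_alt
  simpa using maxAdGoA_eq a.length a b 0 rfl hpre
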